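-- pv_equiv track=rewrite | github.com/MrBrantCode/unitest_baseline | mut_generate/mist_train_cf/cf_94754/solution.py | reverse_and_remove_duplicates
-- ===== SOURCE A (Python) =====
-- def reverse_and_remove_duplicates(arr):
--     def is_prime(num):
--         if num < 2:
--             return False
--         for i in range(2, int(abs(num)**0.5) + 1):
--             if num % i == 0:
--                 return False
--         return True
--
--     reversed_arr = arr[::-1]
--     non_prime_count = {}
--
--     for num in reversed_arr[:]:
--         if is_prime(abs(num)):
--             reversed_arr.remove(num)
--         elif num not in non_prime_count:
--             non_prime_count[num] = 1
--         else:
--             non_prime_count[num] += 1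
--
--     return reversed_arr, non_prime_count
-- ===== SOURCE B (Python) =====
-- def reverse_and_remove_duplicates(arr):
--     def is_prime(n):
--         if n < 2:
--             return False
--         if n % 2 == 0:
--             return n == 2
--         d = 3
--         while d * d <= n:
--             if n % d == 0:
--                 return False
--             d += 2
--         return True
--
--     prime_vals = {v for v in set(arr) if is_prime(abs(v))}
--     kept = [x for x in reversed(arr) if x not in prime_vals]
--     cnt = {}
--     for x in kept:
--         cnt[x] = cnt.get(x, 0) + 1
--     return kept, cnt
-- ===== Notes on version B (the rewrite author's own statement) =====
-- stated objective: faster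
-- what changed: A reverses and then repeatedly calls list.remove inside the loop (a quadratic remove pass) and runs trial division for every element; B computes the prime values once over the distinct elements (odd-only trial division), then builds the kept list in one filter pass over the reversed array and counts it in one dict pass.
import Mathlib
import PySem

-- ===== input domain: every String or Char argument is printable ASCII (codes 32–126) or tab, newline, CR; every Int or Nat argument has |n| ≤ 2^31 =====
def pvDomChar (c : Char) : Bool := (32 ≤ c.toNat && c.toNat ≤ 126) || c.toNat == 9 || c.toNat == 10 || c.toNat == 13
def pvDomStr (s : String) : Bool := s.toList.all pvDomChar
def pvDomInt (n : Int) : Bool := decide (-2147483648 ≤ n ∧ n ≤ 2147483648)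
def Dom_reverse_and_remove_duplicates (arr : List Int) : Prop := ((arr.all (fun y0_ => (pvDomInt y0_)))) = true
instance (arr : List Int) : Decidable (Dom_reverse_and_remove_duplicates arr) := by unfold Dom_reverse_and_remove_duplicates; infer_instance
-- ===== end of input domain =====

-- B replaces A's quadratic reverse-then-list.remove loop by one filter pass over the reversed
-- list, with primality decided once per distinct value by odd-only trial division (objective: faster).

-- ===== PORT A =====
-- is_prime: int(abs(num)**0.5) is ported as Nat.sqrt num.natAbs, exact for |num| ≤ 2^31 (Dom)
def pvIsPrimeA (num : Int) : Bool :=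
  if num < 2 then false
  else (PySem.List.pyRange 2 ((Nat.sqrt num.natAbs : Int) + 1) 1).all
        (fun i => !(PySem.Int.mod num i == 0))

-- the for-loop over reversed_arr[:], carrying the mutating reversed_arr and the count dict;
-- .remove never raises here (the element is in the list), so the none branch is unreachable
def pvLoopA : List Int → List Int → PySem.Dict Int Int → List Int × PySem.Dict Int Int
  | [], rev, d => (rev, d)
  | num :: rest, rev, d =>
    if pvIsPrimeA |num| then
      pvLoopA rest ((PySem.List.remove? rev num).getD rev) d
    else if (PySem.Dict.get? d num).isNone then
      pvLoopA rest rev (PySem.Dict.insert d num 1)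
    else
      pvLoopA rest rev (PySem.Dict.insert d num (PySem.Dict.getD d num 0 + 1))

def reverse_and_remove_duplicates (arr : List Int) : List Int × (List (Int × Int)) :=
  let rev := (PySem.List.slice? arr none none (-1)).getD []   -- arr[::-1]
  let r := pvLoopA rev rev PySem.Dict.empty
  (r.1, r.2.items)

-- ===== PORT B =====
-- odd-only trial division: while d*d <= n: if n % d == 0 return False; d += 2
def pvOddTrial (n d : Nat) : Bool :=
  if d * d ≤ n then
    (if n % d == 0 then false else pvOddTrial n (d + 2))
  else true
termination_by n + 1 - d
decreasing_by
  rename_i h _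
  have hd : d ≤ n := by nlinarith
  omega

def pvIsPrimeB (n : Nat) : Bool :=
  if n < 2 then false
  else if n % 2 == 0 then n == 2
  else pvOddTrial n 3

def reverse_and_remove_duplicates_alt (arr : List Int) : List Int × (List (Int × Int)) :=
  let primeVals : List Int := (PySem.Set.ofList arr).filter (fun v => pvIsPrimeB v.natAbs)
  let kept := arr.reverse.filter (fun x => !(primeVals.contains x))
  let cnt := kept.foldl (fun d x => PySem.Dict.insert d x (PySem.Dict.getD d x 0 + 1)) PySem.Dict.empty
  (kept, cnt.items)

-- ===== PRECONDITION & SPEC =====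
def Spec_reverse_and_remove_duplicates (arr : List Int) (out : List Int × (List (Int × Int))) : Prop := out = reverse_and_remove_duplicates_alt arr
instance (arr : List Int) (out : List Int × (List (Int × Int))) : Decidable (Spec_reverse_and_remove_duplicates arr out) := by unfold Spec_reverse_and_remove_duplicates; infer_instance

-- ===== CLAIM (what is proved, stated in full; the proofs are below) =====
def Claim_equal_reverse_and_remove_duplicates : Prop := ∀ (arr : List Int), Dom_reverse_and_remove_duplicates arr → Spec_reverse_and_remove_duplicates arr (reverse_and_remove_duplicates arr)

-- ===== LEMMAS AND PROOFS =====

-- A's trial division decides Nat.Prime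
theorem pvIsPrimeA_eq (n : Nat) : pvIsPrimeA (n : Int) = decide (Nat.Prime n) := by
  unfold pvIsPrimeA
  by_cases h2 : (n : Int) < 2
  · have hnp : ¬ Nat.Prime n := by
      intro hp; have := hp.two_le; omega
    simp [h2, hnp]
  · push Not at h2
    have hn2 : 2 ≤ n := by exact_mod_cast h2
    rw [if_neg (not_lt.mpr h2), Int.natAbs_natCast]
    rw [Bool.eq_iff_iff]
    simp only [List.all_eq_true, PySem.List.mem_pyRange_one, Bool.not_eq_eq_eq_not,
      Bool.not_true, beq_eq_false_iff_ne, ne_eq, decide_eq_true_eq]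
    constructor
    · intro h
      rw [Nat.prime_def_le_sqrt]
      refine ⟨hn2, fun m hm2 hmsqrt hdvd => ?_⟩
      have := h (m : Int) ⟨by exact_mod_cast hm2, by omega⟩
      rw [PySem.Int.mod_eq_zero_iff_dvd] at this
      exact this (Int.natCast_dvd_natCast.mpr hdvd)
    · intro hp i ⟨hi2, hiu⟩
      rw [PySem.Int.mod_eq_zero_iff_dvd]
      intro hdvd
      rw [Nat.prime_def_le_sqrt] at hp
      have h0 : 0 ≤ i := by omega
      have := hp.2 i.toNat (by omega) (by omega)
      rw [← Int.natCast_dvd_natCast, Int.toNat_of_nonneg h0] at this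
      exact this hdvd

-- B's odd trial division: characterisation of the while loop
theorem pvOddTrial_true_iff (n d : Nat) :
    pvOddTrial n d = true ↔ ∀ m, d ≤ m → (m - d) % 2 = 0 → m * m ≤ n → ¬ m ∣ n := by
  induction d using pvOddTrial.induct n with
  | case1 x hle hdvd =>
    rw [pvOddTrial, if_pos hle, if_pos hdvd]
    simp only [beq_iff_eq] at hdvd
    exact iff_of_false (by simp)
      (fun hAll => hAll x le_rfl (by simp) hle (Nat.dvd_of_mod_eq_zero hdvd))
  | case2 x hle hdvd ih =>
    rw [pvOddTrial, if_pos hle, if_neg hdvd, ih]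
    simp only [beq_iff_eq] at hdvd
    have hnd : ¬ x ∣ n := fun hdv => hdvd (Nat.mod_eq_zero_of_dvd hdv)
    constructor
    · intro h m hm hpar hsq
      rcases Nat.eq_or_lt_of_le hm with he | hlt
      · subst he; exact hnd
      · exact h m (by omega) (by omega) hsq
    · intro h m hm hpar hsq
      exact h m (by omega) (by omega) hsq
  | case3 x hgt =>
    rw [pvOddTrial, if_neg hgt]
    simp only [true_iff]
    intro m hm _ hsq
    exact absurd hsq (by push Not at hgt ⊢; calc n < x * x := hgt
                                                _ ≤ m * m := Nat.mul_le_mul hm hm)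

-- B's primality test decides Nat.Prime
theorem pvIsPrimeB_eq (n : Nat) : pvIsPrimeB n = decide (Nat.Prime n) := by
  unfold pvIsPrimeB
  by_cases h2 : n < 2
  · have hnp : ¬ Nat.Prime n := by intro hp; have := hp.two_le; omega
    simp [h2, hnp]
  · push Not at h2
    rw [if_neg (not_lt.mpr h2)]
    by_cases he : n % 2 = 0
    · rw [if_pos (by simpa using he), Bool.eq_iff_iff]
      simp only [beq_iff_eq, decide_eq_true_eq]
      constructor
      · rintro rfl; exact Nat.prime_two
      · intro hp
        have hdvd : 2 ∣ n := Nat.dvd_of_mod_eq_zero he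
        rcases hp.eq_one_or_self_of_dvd 2 hdvd with h | h <;> omega
    · rw [if_neg (by simpa using he), Bool.eq_iff_iff, pvOddTrial_true_iff]
      simp only [decide_eq_true_eq]
      constructor
      · intro h
        by_contra hnp
        have hp := Nat.minFac_prime (by omega : n ≠ 1)
        have hd := Nat.minFac_dvd n
        have hsq := Nat.minFac_sq_le_self (by omega) hnp
        rw [pow_two] at hsq
        have hp2 : n.minFac ≠ 2 := by
          intro e; rw [e] at hd; exact he (Nat.mod_eq_zero_of_dvd hd)
        have hodd : n.minFac % 2 = 1 := by
          rcases Nat.mod_two_eq_zero_or_one n.minFac with h0 | h1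
          · rcases hp.eq_one_or_self_of_dvd 2 (Nat.dvd_of_mod_eq_zero h0) with e | e
            · omega
            · exact absurd e.symm hp2
          · exact h1
        have hge := hp.two_le
        exact h n.minFac (by omega) (by omega) hsq hd
      · intro hp m hm3 hpar hsq hdvd
        rcases hp.eq_one_or_self_of_dvd m hdvd with e | e
        · omega
        · subst e
          have := hp.two_le
          nlinarith

theorem pvPrime_bridge (x : Int) : pvIsPrimeA |x| = pvIsPrimeB x.natAbs := by
  rw [Int.abs_eq_natAbs, pvIsPrimeA_eq, pvIsPrimeB_eq]

-- remove? takes the head occurrence when the prefix is clean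
theorem pvRemove_mid (xs rest : List Int) (num : Int) (h : num ∉ xs) :
    PySem.List.remove? (xs ++ num :: rest) num = some (xs ++ rest) := by
  induction xs with
  | nil => simp [PySem.List.remove?_cons_self]
  | cons y ys ih =>
    have hy : y ≠ num := by intro e; exact h (e ▸ List.mem_cons_self)
    have hm : num ∉ ys := fun hm => h (List.mem_cons_of_mem _ hm)
    simp [PySem.List.remove?_cons_of_ne _ hy, ih hm]

-- when the key is absent, getD returns the default
theorem pvGetD_of_none (d : PySem.Dict Int Int) (k : Int)
    (h : (PySem.Dict.get? d k).isNone = true) : PySem.Dict.getD d k 0 = 0 := by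
  simp only [PySem.Dict.getD]
  cases hg : PySem.Dict.get? d k with
  | none => simp
  | some v => rw [hg] at h; simp at h

-- the invariant of A's loop
theorem pvLoopA_inv (l done : List Int) (d : PySem.Dict Int Int) :
    pvLoopA l (done.filter (fun x => !pvIsPrimeA |x|) ++ l) d
      = (done.filter (fun x => !pvIsPrimeA |x|) ++ l.filter (fun x => !pvIsPrimeA |x|),
         (l.filter (fun x => !pvIsPrimeA |x|)).foldl
           (fun d x => PySem.Dict.insert d x (PySem.Dict.getD d x 0 + 1)) d) := by
  induction l generalizing done d with
  | nil => simp [pvLoopA]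
  | cons num rest ih =>
    rw [pvLoopA]
    by_cases h : pvIsPrimeA |num|
    · rw [if_pos h]
      have hnm : num ∉ done.filter (fun x => !pvIsPrimeA |x|) := by
        intro hmem
        have := (List.mem_filter.mp hmem).2
        simp [h] at this
      rw [pvRemove_mid _ _ _ hnm, Option.getD_some]
      have hrw : done.filter (fun x => !pvIsPrimeA |x|) ++ rest
          = (done ++ [num]).filter (fun x => !pvIsPrimeA |x|) ++ rest := by
        simp [List.filter_append, h]
      rw [hrw, ih]
      simp [List.filter_append, h]
    · rw [if_neg h]
      have hstep : ∀ d' : PySem.Dict Int Int,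
          pvLoopA rest (done.filter (fun x => !pvIsPrimeA |x|) ++ num :: rest) d'
            = ((done ++ [num]).filter (fun x => !pvIsPrimeA |x|) ++ rest.filter (fun x => !pvIsPrimeA |x|),
               (rest.filter (fun x => !pvIsPrimeA |x|)).foldl
                 (fun d x => PySem.Dict.insert d x (PySem.Dict.getD d x 0 + 1)) d') := by
        intro d'
        have hrw : done.filter (fun x => !pvIsPrimeA |x|) ++ num :: rest
            = (done ++ [num]).filter (fun x => !pvIsPrimeA |x|) ++ rest := by
          simp [List.filter_append, h]
        rw [hrw, ih]
      by_cases hg : (PySem.Dict.get? d num).isNone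
      · rw [if_pos hg, hstep]
        have hins : PySem.Dict.insert d num (1 : Int)
            = PySem.Dict.insert d num (PySem.Dict.getD d num 0 + 1) := by
          rw [pvGetD_of_none d num hg]; norm_num
        rw [hins]
        simp [List.filter_append, h]
      · rw [if_neg hg, hstep]
        simp [List.filter_append, h]

-- B's kept list is A's filtered list
theorem pvKept_eq (arr : List Int) :
    arr.reverse.filter
        (fun x => !(((PySem.Set.ofList arr).filter (fun v => pvIsPrimeB v.natAbs)).contains x))
      = arr.reverse.filter (fun x => !pvIsPrimeA |x|) := by
  apply List.filter_congr
  intro x hx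
  have hxa : x ∈ arr := List.mem_reverse.mp hx
  have hcontains : ((PySem.Set.ofList arr).filter (fun v => pvIsPrimeB v.natAbs)).contains x
      = pvIsPrimeB x.natAbs := by
    rw [Bool.eq_iff_iff, List.contains_iff_mem, List.mem_filter, PySem.Set.mem_ofList]
    constructor
    · exact fun ⟨_, hp⟩ => hp
    · exact fun hp => ⟨hxa, hp⟩
  rw [hcontains, pvPrime_bridge]

-- ===== VERDICT (by name: the statement is the Claim_ definition above) =====
theorem reverse_and_remove_duplicates_spec : Claim_equal_reverse_and_remove_duplicates := by
  intro arr _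
  unfold Spec_reverse_and_remove_duplicates reverse_and_remove_duplicates reverse_and_remove_duplicates_alt
  dsimp only
  rw [PySem.List.slice?_none_none_neg_one]
  simp only [Option.getD_some]
  rw [pvKept_eq]
  have h0 := pvLoopA_inv arr.reverse [] PySem.Dict.empty
  simp only [List.filter_nil, List.nil_append] at h0
  rw [h0]
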